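-- pv_equiv track=rewrite | github.com/elxa-dal/themerator | theme.py | prominence
-- ===== SOURCE A (Python) =====
-- from typing import Callable, Dict, List, Sequence, Tuple, Union
--
-- def prominence(rgb: Tuple, highlights: List) -> int:
--     """
--     Score a colour based on the prominence of highlights
--     """
--     if not isinstance(highlights, list):
--         highlights = [highlights]
--
--     if any(highlight not in ["red", "green", "blue"] for highlight in highlights):
--         raise ValueError("Bad highlight selection")
--
--     desired, undesired = [], []
--
--     for colour, string in zip(rgb, ["red", "green", "blue"]):
--         if string in highlights:
--             desired.append(colour)
--         else:
--             undesired.append(colour)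
--
--     return min([d - u for d in desired for u in undesired])
-- ===== SOURCE B (Python) =====
-- def prominence(rgb, highlights):
--     """
--     Score a colour based on the prominence of highlights
--     """
--     if not isinstance(highlights, list):
--         highlights = [highlights]
--
--     if any(highlight not in ["red", "green", "blue"] for highlight in highlights):
--         raise ValueError("Bad highlight selection")
--
--     desired, undesired = [], []
--
--     for colour, string in zip(rgb, ["red", "green", "blue"]):
--         if string in highlights:
--             desired.append(colour)
--         else:
--             undesired.append(colour)
--
--     # min pairwise difference = smallest desired minus largest undesired
--     return min(desired) - max(undesired)
-- ===== Notes on version B (the rewrite author's own statement) =====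
-- stated objective: simpler
-- what changed: Replaces the quadratic nested comprehension min([d - u for d in desired for u in undesired]) with the closed form min(desired) - max(undesired), which computes the same minimum pairwise difference in linear time.
import Mathlib
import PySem

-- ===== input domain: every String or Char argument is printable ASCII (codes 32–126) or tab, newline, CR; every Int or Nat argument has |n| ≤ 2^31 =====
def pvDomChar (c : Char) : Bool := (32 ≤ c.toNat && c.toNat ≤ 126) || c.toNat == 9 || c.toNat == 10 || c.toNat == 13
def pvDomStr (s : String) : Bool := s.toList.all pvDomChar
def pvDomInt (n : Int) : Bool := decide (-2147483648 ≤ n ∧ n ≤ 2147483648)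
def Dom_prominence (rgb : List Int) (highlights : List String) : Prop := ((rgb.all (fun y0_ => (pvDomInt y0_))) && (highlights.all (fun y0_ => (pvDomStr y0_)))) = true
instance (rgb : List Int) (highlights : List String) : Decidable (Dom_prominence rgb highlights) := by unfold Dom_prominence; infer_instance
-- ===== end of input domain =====

-- B replaces A's nested pairwise-difference comprehension with the closed form
-- min(desired) - max(undesired); validation and the classification loop are unchanged.

-- ===== PORT A =====
-- shared classification loop: for colour, string in zip(rgb, ["red","green","blue"]): ...
def pvClassify (rgb : List Int) (highlights : List String) : List Int × List Int :=
  (rgb.zip ["red", "green", "blue"]).foldl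
    (fun acc p => if p.2 ∈ highlights then (acc.1 ++ [p.1], acc.2) else (acc.1, acc.2 ++ [p.1]))
    ([], [])

def prominence (rgb : List Int) (highlights : List String) : Int :=
  let du := pvClassify rgb highlights
  -- min([d - u for d in desired for u in undesired]); min([]) raises → excluded by Pre_
  (PySem.List.min? (du.1.flatMap (fun d => du.2.map (fun u => d - u))) (fun x => x)).getD 0

-- ===== PORT B =====
def prominence_alt (rgb : List Int) (highlights : List String) : Int :=
  let du := pvClassify rgb highlights
  -- min(desired) - max(undesired); raises on an empty list → excluded by Pre_
  (PySem.List.min? du.1 (fun x => x)).getD 0 - (PySem.List.max? du.2 (fun x => x)).getD 0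

-- ===== PRECONDITION & SPEC =====
-- Pre_ excludes exactly the inputs where A raises: a highlight outside {"red","green","blue"}
-- (ValueError), or no channel classified as desired / as undesired (min of an empty list).
def Pre_prominence (rgb : List Int) (highlights : List String) : Prop :=
  (∀ h ∈ highlights, h = "red" ∨ h = "green" ∨ h = "blue") ∧
  (∃ p ∈ rgb.zip ["red", "green", "blue"], p.2 ∈ highlights) ∧
  (∃ p ∈ rgb.zip ["red", "green", "blue"], p.2 ∉ highlights)
instance (rgb : List Int) (highlights : List String) : Decidable (Pre_prominence rgb highlights) := by unfold Pre_prominence; infer_instance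

def pvWitness_prominence : List Int × List String := ([10, 200, 30], ["green"])

def Spec_prominence (rgb : List Int) (highlights : List String) (out : Int) : Prop := out = prominence_alt rgb highlights
instance (rgb : List Int) (highlights : List String) (out : Int) : Decidable (Spec_prominence rgb highlights out) := by unfold Spec_prominence; infer_instance

-- ===== CLAIM (what is proved, stated in full; the proofs are below) =====
def Claim_equal_prominence : Prop := ∀ (rgb : List Int) (highlights : List String), Dom_prominence rgb highlights → Pre_prominence rgb highlights → Spec_prominence rgb highlights (prominence rgb highlights)

-- ===== LEMMAS AND PROOFS =====

-- the fold classifies: desired = first components of pairs whose name is highlighted, undesired the rest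
theorem pvClassify_eq (rgb : List Int) (highlights : List String) :
    pvClassify rgb highlights =
      (((rgb.zip ["red", "green", "blue"]).filter (fun p => decide (p.2 ∈ highlights))).map Prod.fst,
       ((rgb.zip ["red", "green", "blue"]).filter (fun p => decide (p.2 ∉ highlights))).map Prod.fst) := by
  unfold pvClassify
  generalize rgb.zip ["red", "green", "blue"] = l
  suffices h : ∀ (acc : List Int × List Int),
      l.foldl (fun acc p => if p.2 ∈ highlights then (acc.1 ++ [p.1], acc.2) else (acc.1, acc.2 ++ [p.1])) acc =
      (acc.1 ++ (l.filter (fun p => decide (p.2 ∈ highlights))).map Prod.fst,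
       acc.2 ++ (l.filter (fun p => decide (p.2 ∉ highlights))).map Prod.fst) by
    simpa using h ([], [])
  induction l with
  | nil => simp
  | cons p t ih =>
    intro acc
    by_cases hp : p.2 ∈ highlights <;> simp [hp, ih]

-- min over all pairwise differences of two nonempty lists = min l₁ - max l₂
theorem min_flatMap_sub (l₁ l₂ : List Int) (h₁ : l₁ ≠ []) (h₂ : l₂ ≠ []) :
    (PySem.List.min? (l₁.flatMap (fun d => l₂.map (fun u => d - u))) (fun x => x)).getD 0 =
    (PySem.List.min? l₁ (fun x => x)).getD 0 - (PySem.List.max? l₂ (fun x => x)).getD 0 := by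
  obtain ⟨a, ha⟩ : ∃ a, PySem.List.min? l₁ (fun x => x) = some a := by
    cases hm : PySem.List.min? l₁ (fun x => x) with
    | none => exact absurd ((PySem.List.min?_eq_none_iff _ _).mp hm) h₁
    | some a => exact ⟨a, rfl⟩
  obtain ⟨b, hb⟩ : ∃ b, PySem.List.max? l₂ (fun x => x) = some b := by
    cases hm : PySem.List.max? l₂ (fun x => x) with
    | none => exact absurd ((PySem.List.max?_eq_none_iff _ _).mp hm) h₂
    | some b => exact ⟨b, rfl⟩
  have haMem : a ∈ l₁ := PySem.List.min?_mem ha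
  have hbMem : b ∈ l₂ := PySem.List.max?_mem hb
  have haMin : ∀ y ∈ l₁, a ≤ y := PySem.List.min?_isMin ha
  have hbMax : ∀ y ∈ l₂, y ≤ b := PySem.List.max?_isMax hb
  obtain ⟨v, hv⟩ : ∃ v, PySem.List.min? (l₁.flatMap (fun d => l₂.map (fun u => d - u))) (fun x => x) = some v := by
    cases hm : PySem.List.min? (l₁.flatMap (fun d => l₂.map (fun u => d - u))) (fun x => x) with
    | none =>
      have := (PySem.List.min?_eq_none_iff _ _).mp hm
      rw [List.flatMap_eq_nil_iff] at this
      obtain ⟨x, hx⟩ := List.exists_mem_of_ne_nil l₁ h₁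
      exact absurd (List.map_eq_nil_iff.mp (this _ hx)) h₂
    | some v => exact ⟨v, rfl⟩
  have hvMem : v ∈ l₁.flatMap (fun d => l₂.map (fun u => d - u)) := PySem.List.min?_mem hv
  have hvMin : ∀ y ∈ l₁.flatMap (fun d => l₂.map (fun u => d - u)), v ≤ y := PySem.List.min?_isMin hv
  have habMem : a - b ∈ l₁.flatMap (fun d => l₂.map (fun u => d - u)) := by
    simp only [List.mem_flatMap, List.mem_map]
    exact ⟨a, haMem, b, hbMem, rfl⟩
  have h1 : v ≤ a - b := hvMin _ habMem
  have h2 : a - b ≤ v := by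
    simp only [List.mem_flatMap, List.mem_map] at hvMem
    obtain ⟨d, hd, u, hu, rfl⟩ := hvMem
    have := haMin d hd
    have := hbMax u hu
    omega
  rw [hv, ha, hb]
  simp; omega

-- ===== VERDICT (by name: the statement is the Claim_ definition above) =====
theorem prominence_spec : Claim_equal_prominence := by
  intro rgb highlights _ hpre
  obtain ⟨_, ⟨p, hp, hpin⟩, ⟨q, hq, hqout⟩⟩ := hpre
  unfold Spec_prominence prominence prominence_alt
  rw [pvClassify_eq]
  apply min_flatMap_sub
  · simp only [ne_eq, List.map_eq_nil_iff, List.filter_eq_nil_iff, not_forall]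
    exact ⟨p, hp, by simpa using hpin⟩
  · simp only [ne_eq, List.map_eq_nil_iff, List.filter_eq_nil_iff, not_forall]
    exact ⟨q, hq, by simpa using hqout⟩
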